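-- pv_equiv track=rewrite | github.com/swiss-ai/nanotron | src/nanotron/data/nanoset.py | _get_num_epochs
-- ===== SOURCE A (Python) =====
-- def _get_num_epochs(num_tokens_per_epoch: int, seq_length: int, num_samples: int) -> int:
--     """Calculate the number of epochs
--
--     Args:
--         num_tokens_per_epoch (int): The number of tokens in a single epoch
--
--         seq_length (int): The sequence length in tokens
--
--         num_samples (int): The total number of samples
--
--     Returns:
--         int: The number of epochs
--     """
--     num_epochs = 0
--     num_tokens = 0
--     while True:
--         num_epochs += 1
--         num_tokens += num_tokens_per_epoch
--         # -1 is because we need to retrieve seq_length + 1 token each time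
--         # but the last token will overlap with the first token of the next
--         # sample except for the last sample.
--         if ((num_tokens - 1) // seq_length) >= num_samples:
--             return num_epochs
-- ===== SOURCE B (Python) =====
-- def _get_num_epochs(num_tokens_per_epoch: int, seq_length: int, num_samples: int) -> int:
--     # We need num_samples * seq_length + 1 tokens in total; ceiling-divide by the
--     # epoch size, with at least one epoch.
--     needed_tokens = num_samples * seq_length + 1
--     return max(1, -(-needed_tokens // num_tokens_per_epoch))
-- ===== Notes on version B (the rewrite author's own statement) =====
-- stated objective: faster
-- what changed: Replaces the counting loop (one iteration per epoch) by a closed-form ceiling division max(1, ceil((num_samples*seq_length+1)/num_tokens_per_epoch)).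
-- outside the precondition, e.g. on _get_num_epochs(5, -3, -10): A returns 1, B returns 7; on _get_num_epochs(5, 0, 3): A raises ZeroDivisionError, B returns 1; on _get_num_epochs(-5, 3, 2): A does not finish within the time limit, B returns 1
import Mathlib
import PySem

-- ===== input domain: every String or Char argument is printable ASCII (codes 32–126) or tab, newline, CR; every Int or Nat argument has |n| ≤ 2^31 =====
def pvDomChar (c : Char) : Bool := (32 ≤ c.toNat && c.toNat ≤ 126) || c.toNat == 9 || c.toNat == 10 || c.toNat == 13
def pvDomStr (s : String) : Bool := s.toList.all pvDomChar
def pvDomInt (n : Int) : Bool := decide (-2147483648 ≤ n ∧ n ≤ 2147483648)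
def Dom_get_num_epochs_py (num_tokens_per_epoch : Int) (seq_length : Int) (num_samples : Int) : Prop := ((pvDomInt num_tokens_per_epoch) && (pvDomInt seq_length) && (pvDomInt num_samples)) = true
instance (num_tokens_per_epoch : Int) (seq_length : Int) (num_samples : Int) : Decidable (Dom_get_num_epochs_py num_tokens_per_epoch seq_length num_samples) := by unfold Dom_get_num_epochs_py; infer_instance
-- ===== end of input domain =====

-- B replaces A's per-epoch counting loop by the closed-form ceiling division
-- max(1, ceil((num_samples*seq_length+1)/num_tokens_per_epoch)) (objective: faster, asymptotic).


-- ===== PORT A =====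
-- A's `while True` loop, transliterated with a fuel counter; the fuel is only a
-- totality device: under Pre_ the loop terminates well before the fuel runs out.
def getNumEpochsLoop (num_tokens_per_epoch seq_length num_samples : Int) :
    Nat → Int → Int → Int
  | 0, num_epochs, _ => num_epochs   -- unreachable under Pre_
  | fuel + 1, num_epochs, num_tokens =>
    let num_epochs := num_epochs + 1
    let num_tokens := num_tokens + num_tokens_per_epoch
    if num_samples ≤ PySem.Int.floordiv (num_tokens - 1) seq_length then
      num_epochs
    else
      getNumEpochsLoop num_tokens_per_epoch seq_length num_samples fuel num_epochs num_tokens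

def get_num_epochs_py (num_tokens_per_epoch : Int) (seq_length : Int) (num_samples : Int) : Int :=
  getNumEpochsLoop num_tokens_per_epoch seq_length num_samples
    ((num_samples * seq_length).natAbs + 2) 0 0

-- ===== PORT B =====
def get_num_epochs_py_alt (num_tokens_per_epoch : Int) (seq_length : Int) (num_samples : Int) : Int :=
  let needed_tokens := num_samples * seq_length + 1
  max 1 (-(PySem.Int.floordiv (-needed_tokens) num_tokens_per_epoch))

-- ===== PRECONDITION & SPEC =====
-- Pre_ is the natural domain of positive epoch size and sequence length: outside it
-- A raises ZeroDivisionError (seq_length = 0) or loops forever, except on some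
-- negative-parameter combinations where A returns 1 from the first iteration's
-- floor-division accident, which no caller relies on.
def Pre_get_num_epochs_py (num_tokens_per_epoch : Int) (seq_length : Int) (num_samples : Int) : Prop :=
  0 < num_tokens_per_epoch ∧ 0 < seq_length
instance (num_tokens_per_epoch : Int) (seq_length : Int) (num_samples : Int) : Decidable (Pre_get_num_epochs_py num_tokens_per_epoch seq_length num_samples) := by unfold Pre_get_num_epochs_py; infer_instance

def pvWitness_get_num_epochs_py : Int × Int × Int := (10, 4, 7)

def Spec_get_num_epochs_py (num_tokens_per_epoch : Int) (seq_length : Int) (num_samples : Int) (out : Int) : Prop := out = get_num_epochs_py_alt num_tokens_per_epoch seq_length num_samples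
instance (num_tokens_per_epoch : Int) (seq_length : Int) (num_samples : Int) (out : Int) : Decidable (Spec_get_num_epochs_py num_tokens_per_epoch seq_length num_samples out) := by unfold Spec_get_num_epochs_py; infer_instance

-- ===== CLAIM (what is proved, stated in full; the proofs are below) =====
def Claim_equal_get_num_epochs_py : Prop := ∀ (num_tokens_per_epoch : Int) (seq_length : Int) (num_samples : Int), Dom_get_num_epochs_py num_tokens_per_epoch seq_length num_samples → Pre_get_num_epochs_py num_tokens_per_epoch seq_length num_samples → Spec_get_num_epochs_py num_tokens_per_epoch seq_length num_samples (get_num_epochs_py num_tokens_per_epoch seq_length num_samples)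

-- ===== LEMMAS AND PROOFS =====

-- The loop, given enough fuel, computes epochs + max 1 (ceil((N - tokens)/T))
-- where N = num_samples*seq_length + 1 is the total token requirement.
lemma getNumEpochsLoop_eq (T L S : Int) (hT : 0 < T) (hL : 0 < L) :
    ∀ (fuel : Nat) (k tokens : Int),
      S * L + 1 - tokens ≤ (fuel : Int) → 1 ≤ fuel →
      getNumEpochsLoop T L S fuel k tokens
        = k + max 1 (-(PySem.Int.floordiv (-(S * L + 1 - tokens)) T)) := by
  intro fuel
  induction fuel with
  | zero => intro k tokens _ h1; omega
  | succ fuel ih =>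
    intro k tokens hfuel _
    set N := S * L + 1 with hN
    set r := -(PySem.Int.floordiv (-(N - tokens)) T) with hr
    have hbr : (r - 1) * T < N - tokens ∧ N - tokens ≤ r * T := by
      have := (PySem.Int.neg_floordiv_neg_eq_iff_of_pos (a := N - tokens) (b := T) (q := r) hT).mp hr.symm
      exact this
    have hcond : (S ≤ PySem.Int.floordiv (tokens + T - 1) L) ↔ N ≤ tokens + T := by
      rw [PySem.Int.le_floordiv_iff_mul_le hL]; omega
    simp only [getNumEpochsLoop]
    by_cases hc : S ≤ PySem.Int.floordiv (tokens + T - 1) L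
    · rw [if_pos hc]
      have hle : N - tokens ≤ T := by omega
      have h2 : (r - 1) * T < 1 * T := by linarith [hbr.1]
      have h3 : r - 1 < 1 := lt_of_mul_lt_mul_right h2 hT.le
      omega
    · rw [if_neg hc]
      have hgt : T < N - tokens := by omega
      have h2 : 1 * T < r * T := by linarith [hbr.2]
      have h3 : 1 < r := lt_of_mul_lt_mul_right h2 hT.le
      have e1 : (r - 1) * T = r * T - T := by ring
      have e2 : (r - 1 - 1) * T = r * T - 2 * T := by ring
      have hr' : -(PySem.Int.floordiv (-(N - (tokens + T))) T) = r - 1 :=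
        (PySem.Int.neg_floordiv_neg_eq_iff_of_pos hT).mpr (by constructor <;> omega)
      rw [ih (k + 1) (tokens + T) (by omega) (by omega), hr']
      omega

-- ===== VERDICT (by name: the statement is the Claim_ definition above) =====
theorem get_num_epochs_py_spec : Claim_equal_get_num_epochs_py := by
  intro T L S _ hpre
  obtain ⟨hT, hL⟩ := hpre
  unfold Spec_get_num_epochs_py get_num_epochs_py get_num_epochs_py_alt
  rw [getNumEpochsLoop_eq T L S hT hL _ 0 0
      (by omega) (by omega)]
  norm_num
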